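-- pv_equiv track=rewrite | github.com/Yixi-Rao/comp3620-assignment2 | wumpus2csp.py | generate_constraint_domain
-- ===== SOURCE A (Python) =====
-- import itertools
--
-- def generate_constraint_domain(domain, n_adj):
--     """using the permutations of the provided domain to generate the constraint domain such as constraint of there is at less one pit in the adjacent cells of the cell that feels breeze
--
--         Args:
--             domain (list): the list of value e.g. ["S","P"]
--             n_adj (int): the number of variable involved in this constraint
--
--         Raises:
--             SystemExit: we don't need to use the permutations to generate the uanry constraint
--
--         Returns:
--             set: constraint domain
--     """
--     result = set()
--     if len(domain) == 1:
--         result = set(itertools.permutations([domain[0] for _ in range(n_adj)] + ['S' for _ in range(n_adj - 1)], n_adj))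
--     else:
--         if n_adj == 1:
--             raise SystemExit("Error: n_adj == 1 for [B,S].")
--         if n_adj == 2:
--             result = set(itertools.permutations(['W', 'P'], 2))
--         elif n_adj == 3:
--             result = set(itertools.permutations(['W','W', 'P', 'P'], 3)).union(set(itertools.permutations(['W', 'P', 'S'], 3)))
--         else:
--             result = set(itertools.permutations(['W','W','W', 'P', 'P','P'], 4)).union(set(itertools.permutations(['W','P','S','S'], 4)),
--                                                                                        set(itertools.permutations(['W','P','P','S'], 4)),
--                                                                                        set(itertools.permutations(['W','W','P','S'], 4)))
--     return result
-- ===== SOURCE B (Python) =====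
-- # Constraint tables for the two-value ({W,P}-style) branches: all tuples of the
-- # given length over {'W','P','S'} containing at least one 'W' and one 'P'.
-- TABLE2 = {('W', 'P'), ('P', 'W')}
-- TABLE3 = {('W', 'W', 'P'), ('W', 'P', 'W'), ('W', 'P', 'P'), ('P', 'W', 'W'),
--           ('P', 'W', 'P'), ('P', 'P', 'W'), ('W', 'P', 'S'), ('W', 'S', 'P'),
--           ('P', 'W', 'S'), ('P', 'S', 'W'), ('S', 'W', 'P'), ('S', 'P', 'W')}
-- TABLE4 = {('W', 'W', 'W', 'P'), ('W', 'W', 'P', 'W'), ('W', 'W', 'P', 'P'), ('W', 'P', 'W', 'W'),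
--           ('W', 'P', 'W', 'P'), ('W', 'P', 'P', 'W'), ('W', 'P', 'P', 'P'), ('P', 'W', 'W', 'W'),
--           ('P', 'W', 'W', 'P'), ('P', 'W', 'P', 'W'), ('P', 'W', 'P', 'P'), ('P', 'P', 'W', 'W'),
--           ('P', 'P', 'W', 'P'), ('P', 'P', 'P', 'W'), ('W', 'P', 'S', 'S'), ('W', 'S', 'P', 'S'),
--           ('W', 'S', 'S', 'P'), ('P', 'W', 'S', 'S'), ('P', 'S', 'W', 'S'), ('P', 'S', 'S', 'W'),
--           ('S', 'W', 'P', 'S'), ('S', 'W', 'S', 'P'), ('S', 'P', 'W', 'S'), ('S', 'P', 'S', 'W'),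
--           ('S', 'S', 'W', 'P'), ('S', 'S', 'P', 'W'), ('W', 'P', 'P', 'S'), ('W', 'P', 'S', 'P'),
--           ('W', 'S', 'P', 'P'), ('P', 'W', 'P', 'S'), ('P', 'W', 'S', 'P'), ('P', 'P', 'W', 'S'),
--           ('P', 'P', 'S', 'W'), ('P', 'S', 'W', 'P'), ('P', 'S', 'P', 'W'), ('S', 'W', 'P', 'P'),
--           ('S', 'P', 'W', 'P'), ('S', 'P', 'P', 'W'), ('W', 'W', 'P', 'S'), ('W', 'W', 'S', 'P'),
--           ('W', 'P', 'W', 'S'), ('W', 'P', 'S', 'W'), ('W', 'S', 'W', 'P'), ('W', 'S', 'P', 'W'),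
--           ('P', 'W', 'W', 'S'), ('P', 'W', 'S', 'W'), ('P', 'S', 'W', 'W'), ('S', 'W', 'W', 'P'),
--           ('S', 'W', 'P', 'W'), ('S', 'P', 'W', 'W')}
--
--
-- def generate_constraint_domain(domain, n_adj):
--     """Same result as the permutation-based version: single-value domains are
--     enumerated directly as bitmask tuples over {value, 'S'} (at least one value
--     position), multi-value domains use the fixed precomputed tables."""
--     if len(domain) == 1:
--         d = domain[0]
--         n = n_adj
--         # every length-n tuple over {d, 'S'} except (for n > 0) the all-'S' one:
--         # bit set in the mask (most significant bit = position 0) means 'S'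
--         return {tuple('S' if (m >> (n - 1 - i)) & 1 else d for i in range(n))
--                 for m in range(2 ** n - (1 if n > 0 else 0))}
--     if n_adj == 1:
--         raise SystemExit("Error: n_adj == 1 for [B,S].")
--     if n_adj == 2:
--         return TABLE2
--     if n_adj == 3:
--         return TABLE3
--     return TABLE4
-- ===== Notes on version B (the rewrite author's own statement) =====
-- stated objective: alternative
-- what changed: The single-value branch enumerates the 2^n bitmask tuples over {value,'S'} directly instead of deduplicating the (2n-1)!/(n-1)! permutations of a padded pool, and the fixed multi-value branches return precomputed constant tables instead of recomputing unions of permutation sets.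
import Mathlib
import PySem

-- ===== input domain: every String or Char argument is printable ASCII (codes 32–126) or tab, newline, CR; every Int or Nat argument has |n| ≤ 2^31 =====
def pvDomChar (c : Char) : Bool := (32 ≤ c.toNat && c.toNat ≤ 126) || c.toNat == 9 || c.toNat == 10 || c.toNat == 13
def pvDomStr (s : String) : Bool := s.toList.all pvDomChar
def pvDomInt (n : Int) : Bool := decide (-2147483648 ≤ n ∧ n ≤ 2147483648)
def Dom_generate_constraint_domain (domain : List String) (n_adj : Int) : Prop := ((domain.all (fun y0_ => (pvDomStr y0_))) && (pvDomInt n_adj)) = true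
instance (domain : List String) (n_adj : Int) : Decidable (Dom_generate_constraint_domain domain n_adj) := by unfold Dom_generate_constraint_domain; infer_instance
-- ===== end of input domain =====

-- B replaces the permutation-dedup enumeration of the single-value branch by direct
-- bitmask enumeration of the 2^n tuples over {value,'S'}, and the fixed multi-value
-- branches by precomputed constant tables; same returned set everywhere A returns.

-- ===== PORT A =====
-- set(itertools.permutations(pool, r)) is PySem.Set.ofList (PySem.List.permutations pool r);
-- the pool '[domain[0] for _ in range(n_adj)] + ["S" for _ in range(n_adj - 1)]' is ported
-- with pyRange/pyGetD; r = n_adj is n_adj.toNat (exact: Pre_ gives 0 ≤ n_adj on this branch).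
def generate_constraint_domain (domain : List String) (n_adj : Int) : List (List String) :=
  if domain.length = 1 then
    PySem.Set.ofList (PySem.List.permutations
      (((PySem.List.pyRange 0 n_adj 1).map (fun _ => PySem.List.pyGetD domain 0 "")) ++
       ((PySem.List.pyRange 0 (n_adj - 1) 1).map (fun _ => "S")))
      n_adj.toNat)
  else if n_adj = 2 then
    PySem.Set.ofList (PySem.List.permutations ["W", "P"] 2)
  else if n_adj = 3 then
    PySem.Set.union (PySem.Set.ofList (PySem.List.permutations ["W", "W", "P", "P"] 3))
      (PySem.Set.ofList (PySem.List.permutations ["W", "P", "S"] 3))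
  else
    PySem.Set.union (PySem.Set.union (PySem.Set.union
      (PySem.Set.ofList (PySem.List.permutations ["W", "W", "W", "P", "P", "P"] 4))
      (PySem.Set.ofList (PySem.List.permutations ["W", "P", "S", "S"] 4)))
      (PySem.Set.ofList (PySem.List.permutations ["W", "P", "P", "S"] 4)))
      (PySem.Set.ofList (PySem.List.permutations ["W", "W", "P", "S"] 4))

-- ===== PORT B =====
-- Source B's module-level constant tables:
def pvTable2 : List (List String) := [["W", "P"], ["P", "W"]]
def pvTable3 : List (List String) :=
  [["W", "W", "P"], ["W", "P", "W"], ["W", "P", "P"], ["P", "W", "W"],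
   ["P", "W", "P"], ["P", "P", "W"], ["W", "P", "S"], ["W", "S", "P"],
   ["P", "W", "S"], ["P", "S", "W"], ["S", "W", "P"], ["S", "P", "W"]]
def pvTable4 : List (List String) :=
  [["W", "W", "W", "P"], ["W", "W", "P", "W"], ["W", "W", "P", "P"], ["W", "P", "W", "W"],
   ["W", "P", "W", "P"], ["W", "P", "P", "W"], ["W", "P", "P", "P"], ["P", "W", "W", "W"],
   ["P", "W", "W", "P"], ["P", "W", "P", "W"], ["P", "W", "P", "P"], ["P", "P", "W", "W"],
   ["P", "P", "W", "P"], ["P", "P", "P", "W"], ["W", "P", "S", "S"], ["W", "S", "P", "S"],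
   ["W", "S", "S", "P"], ["P", "W", "S", "S"], ["P", "S", "W", "S"], ["P", "S", "S", "W"],
   ["S", "W", "P", "S"], ["S", "W", "S", "P"], ["S", "P", "W", "S"], ["S", "P", "S", "W"],
   ["S", "S", "W", "P"], ["S", "S", "P", "W"], ["W", "P", "P", "S"], ["W", "P", "S", "P"],
   ["W", "S", "P", "P"], ["P", "W", "P", "S"], ["P", "W", "S", "P"], ["P", "P", "W", "S"],
   ["P", "P", "S", "W"], ["P", "S", "W", "P"], ["P", "S", "P", "W"], ["S", "W", "P", "P"],
   ["S", "P", "W", "P"], ["S", "P", "P", "W"], ["W", "W", "P", "S"], ["W", "W", "S", "P"],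
   ["W", "P", "W", "S"], ["W", "P", "S", "W"], ["W", "S", "W", "P"], ["W", "S", "P", "W"],
   ["P", "W", "W", "S"], ["P", "W", "S", "W"], ["P", "S", "W", "W"], ["S", "W", "W", "P"],
   ["S", "W", "P", "W"], ["S", "P", "W", "W"]]

-- Source B raises SystemExit on (len(domain) ≠ 1, n_adj == 1), outside Pre_; the port
-- simply falls through to the last branch there.
def generate_constraint_domain_alt (domain : List String) (n_adj : Int) : List (List String) :=
  if domain.length = 1 then
    let d := PySem.List.pyGetD domain 0 ""
    let n := n_adj.toNat
    PySem.Set.ofList ((List.range (2 ^ n - (if 0 < n then 1 else 0))).map (fun m =>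
      (List.range n).map (fun i => if (m >>> (n - 1 - i)) % 2 = 1 then "S" else d)))
  else if n_adj = 2 then pvTable2
  else if n_adj = 3 then pvTable3
  else pvTable4

-- ===== PRECONDITION & SPEC =====
-- Pre_ excludes exactly the raising inputs: a single-value domain with negative n_adj
-- (itertools.permutations raises ValueError) and a non-single domain with n_adj == 1
-- (explicit SystemExit).
def Pre_generate_constraint_domain (domain : List String) (n_adj : Int) : Prop :=
  (domain.length = 1 → 0 ≤ n_adj) ∧ (domain.length ≠ 1 → n_adj ≠ 1)
instance (domain : List String) (n_adj : Int) : Decidable (Pre_generate_constraint_domain domain n_adj) := by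
  unfold Pre_generate_constraint_domain; infer_instance

def pvWitness_generate_constraint_domain : List String × Int := (["P"], 2)

def Spec_generate_constraint_domain (domain : List String) (n_adj : Int) (out : List (List String)) : Prop := out = generate_constraint_domain_alt domain n_adj
instance (domain : List String) (n_adj : Int) (out : List (List String)) : Decidable (Spec_generate_constraint_domain domain n_adj out) := by unfold Spec_generate_constraint_domain; infer_instance

-- ===== CLAIM (what is proved, stated in full; the proofs are below) =====
def Claim_equal_generate_constraint_domain : Prop := ∀ (domain : List String) (n_adj : Int), Dom_generate_constraint_domain domain n_adj → Pre_generate_constraint_domain domain n_adj → Spec_generate_constraint_domain domain n_adj (generate_constraint_domain domain n_adj)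

-- ===== LEMMAS AND PROOFS =====

theorem pv_ofList_absorb {α : Type} [BEq α] [LawfulBEq α] (xs ys : List α)
    (h : ∀ y ∈ ys, y ∈ xs) : PySem.Set.ofList (xs ++ ys) = PySem.Set.ofList xs := by
  rw [PySem.Set.ofList_append, PySem.Set.update_eq_append_filter]
  have hnil : (PySem.Set.ofList ys).filter (fun y => !(PySem.Set.contains (PySem.Set.ofList xs) y)) = [] := by
    apply List.filter_eq_nil_iff.mpr
    intro y hy
    have hyx : y ∈ xs := h y ((PySem.Set.mem_ofList ys y).mp hy)
    simpa using hyx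
  rw [hnil, List.append_nil]

theorem pv_ofList_append_disjoint {α : Type} [BEq α] [LawfulBEq α] (xs ys : List α)
    (h : ∀ y ∈ ys, y ∉ xs) : PySem.Set.ofList (xs ++ ys) = PySem.Set.ofList xs ++ PySem.Set.ofList ys := by
  rw [PySem.Set.ofList_append, PySem.Set.update_eq_append_filter]
  congr 1
  apply List.filter_eq_self.mpr
  intro y hy
  have hyx : y ∉ xs := h y ((PySem.Set.mem_ofList ys y).mp hy)
  simpa using hyx

theorem pv_ofList_map_inj {α β : Type} [BEq α] [LawfulBEq α] [BEq β] [LawfulBEq β]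
    (f : α → β) (hf : Function.Injective f) (l : List α) :
    PySem.Set.ofList (l.map f) = (PySem.Set.ofList l).map f := by
  induction l using List.reverseRecOn with
  | nil => rfl
  | append_singleton l x ih =>
      rw [List.map_append, List.map_singleton, PySem.Set.ofList_append_singleton,
        PySem.Set.ofList_append_singleton, ih]
      by_cases hx : x ∈ PySem.Set.ofList l
      · have h1 : PySem.Set.add (PySem.Set.ofList l) x = PySem.Set.ofList l := by
          simp only [PySem.Set.add, (PySem.Set.contains_iff _ _).mpr hx, if_pos]
        have h2 : PySem.Set.add ((PySem.Set.ofList l).map f) (f x) = (PySem.Set.ofList l).map f := by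
          simp only [PySem.Set.add, (PySem.Set.contains_iff _ _).mpr (List.mem_map_of_mem hx), if_pos]
        rw [h1, h2]
      · have h1 : PySem.Set.add (PySem.Set.ofList l) x = PySem.Set.ofList l ++ [x] := by
          simp only [PySem.Set.add, ite_eq_right_iff]
          intro hc
          exact absurd ((PySem.Set.contains_iff _ _).mp hc) hx
        have h2 : PySem.Set.add ((PySem.Set.ofList l).map f) (f x) = (PySem.Set.ofList l).map f ++ [f x] := by
          simp only [PySem.Set.add, ite_eq_right_iff]
          intro hc
          obtain ⟨y, hy, hyx⟩ := List.mem_map.mp ((PySem.Set.contains_iff _ _).mp hc)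
          exact absurd (hf hyx ▸ hy) hx
        rw [h1, h2, List.map_append, List.map_singleton]

theorem pv_ofList_flatMap_const {α : Type} [BEq α] [LawfulBEq α] (k : Nat) (hk : 0 < k) (blk : List α) :
    PySem.Set.ofList ((List.range k).flatMap (fun _ => blk)) = PySem.Set.ofList blk := by
  obtain ⟨k', rfl⟩ : ∃ k', k = k' + 1 := ⟨k - 1, by omega⟩
  rw [List.range_succ_eq_map, List.flatMap_cons]
  apply pv_ofList_absorb
  intro y hy
  simp only [List.mem_flatMap, List.mem_map] at hy
  obtain ⟨i, _, hyi⟩ := hy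
  exact hyi

theorem pv_eraseIdx_replicate {α : Type} (a i : Nat) (x : α) (h : i < a) :
    (List.replicate a x).eraseIdx i = List.replicate (a - 1) x := by
  rw [List.eraseIdx_eq_take_drop_succ]
  simp only [List.take_replicate, List.drop_replicate, List.replicate_append_replicate]
  congr 1
  omega

theorem pv_perms_pool_succ (d : String) (a b r : Nat) :
    PySem.List.permutations (List.replicate a d ++ List.replicate b "S") (r + 1) =
      (List.range a).flatMap (fun _ =>
        (PySem.List.permutations (List.replicate (a - 1) d ++ List.replicate b "S") r).map (fun p => d :: p)) ++
      (List.range b).flatMap (fun _ =>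
        (PySem.List.permutations (List.replicate a d ++ List.replicate (b - 1) "S") r).map (fun p => "S" :: p)) := by
  rw [PySem.List.permutations]
  have hlen : (List.replicate a d ++ List.replicate b "S").length = a + b := by simp
  rw [hlen, List.range_add, List.flatMap_append, List.flatMap_map]
  congr 1
  · apply List.flatMap_congr
    intro i hi
    have hia : i < a := List.mem_range.mp hi
    have hget : (List.replicate a d ++ List.replicate b "S")[i]? = some d := by
      rw [List.getElem?_append_left (by simpa using hia)]
      simp [hia]
    have herase : (List.replicate a d ++ List.replicate b "S").eraseIdx i =
        List.replicate (a - 1) d ++ List.replicate b "S" := by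
      rw [List.eraseIdx_append_of_lt_length (by simpa using hia), pv_eraseIdx_replicate a i d hia]
    rw [hget, herase]
  · apply List.flatMap_congr
    intro j hj
    have hjb : j < b := List.mem_range.mp hj
    have hget : (List.replicate a d ++ List.replicate b "S")[a + j]? = some "S" := by
      rw [List.getElem?_append_right (by simp)]
      simp [hjb]
    have herase : (List.replicate a d ++ List.replicate b "S").eraseIdx (a + j) =
        List.replicate a d ++ List.replicate (b - 1) "S" := by
      rw [List.eraseIdx_append_of_length_le (by simp)]
      congr 1
      have : a + j - (List.replicate a d).length = j := by simp
      rw [this, pv_eraseIdx_replicate b j "S" hjb]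
    rw [hget, herase]

def pvPat (d : String) (n m : Nat) : List String :=
  (List.range n).map (fun i => if (m >>> (n - 1 - i)) % 2 = 1 then "S" else d)

def pvT (d : String) : Nat → Nat → Nat → List (List String)
  | a, b, r + 1 =>
      (if a = 0 then [] else (pvT d (a - 1) b r).map (fun t => d :: t)) ++
      (if b = 0 then [] else (pvT d a (b - 1) r).map (fun t => "S" :: t))
  | _, _, 0 => [[]]

-- A side: set(permutations(pool, r)) is pvT
theorem pv_ofList_perms_eq_T (d : String) (hd : d ≠ "S") (r : Nat) :
    ∀ a b : Nat, PySem.Set.ofList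
      (PySem.List.permutations (List.replicate a d ++ List.replicate b "S") r) = pvT d a b r := by
  induction r with
  | zero => intro a b; rfl
  | succ r ih =>
      intro a b
      rw [pv_perms_pool_succ]
      rw [pv_ofList_append_disjoint]
      · have hA : PySem.Set.ofList ((List.range a).flatMap (fun _ =>
            (PySem.List.permutations (List.replicate (a - 1) d ++ List.replicate b "S") r).map (fun p => d :: p))) =
            (if a = 0 then [] else (pvT d (a - 1) b r).map (fun t => d :: t)) := by
          by_cases ha : a = 0
          · subst ha; simp
          · rw [if_neg ha, pv_ofList_flatMap_const a (by omega),
              pv_ofList_map_inj _ (fun x y h => by injection h), ih]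
        have hB : PySem.Set.ofList ((List.range b).flatMap (fun _ =>
            (PySem.List.permutations (List.replicate a d ++ List.replicate (b - 1) "S") r).map (fun p => "S" :: p))) =
            (if b = 0 then [] else (pvT d a (b - 1) r).map (fun t => "S" :: t)) := by
          by_cases hb : b = 0
          · subst hb; simp
          · rw [if_neg hb, pv_ofList_flatMap_const b (by omega),
              pv_ofList_map_inj _ (fun x y h => by injection h), ih]
        rw [hA, hB]
        simp only [pvT]
      · intro y hy hy'
        simp only [List.mem_flatMap, List.mem_map, List.mem_range] at hy hy'
        obtain ⟨i, hi, p, hp, hyp⟩ := hy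
        obtain ⟨j, hj, q, hq, hyq⟩ := hy'
        rw [← hyp] at hyq
        exact hd (List.cons_eq_cons.mp hyq).1

theorem pv_pat_low (d : String) (n m : Nat) (hm : m < 2 ^ n) :
    pvPat d (n + 1) m = d :: pvPat d n m := by
  unfold pvPat
  rw [List.range_succ_eq_map, List.map_cons, List.map_map]
  congr 1
  · have h0 : m >>> n = 0 := by
      rw [Nat.shiftRight_eq_div_pow]
      exact Nat.div_eq_of_lt hm
    simp [h0]
  · apply List.map_congr_left
    intro i hi
    simp only [Function.comp_apply]
    have hsub : n + 1 - 1 - (i + 1) = n - 1 - i := by omega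
    rw [hsub]

theorem pv_pat_high (d : String) (n m : Nat) (hm : m < 2 ^ n) :
    pvPat d (n + 1) (2 ^ n + m) = "S" :: pvPat d n m := by
  unfold pvPat
  rw [List.range_succ_eq_map, List.map_cons, List.map_map]
  congr 1
  · have h0 : (2 ^ n + m) >>> n = 1 := by
      rw [Nat.shiftRight_eq_div_pow]
      rw [Nat.add_comm, Nat.add_div_right _ (Nat.two_pow_pos n)]
      rw [Nat.div_eq_of_lt hm]
    simp [h0]
  · apply List.map_congr_left
    intro i hi
    have hin : i < n := List.mem_range.mp hi
    simp only [Function.comp_apply]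
    have hsub : n + 1 - 1 - (i + 1) = n - 1 - i := by omega
    rw [hsub]
    have hk : n - 1 - i < n := by omega
    have hshift : (2 ^ n + m) >>> (n - 1 - i) % 2 = m >>> (n - 1 - i) % 2 := by
      set k := n - 1 - i with hkdef
      rw [Nat.shiftRight_eq_div_pow, Nat.shiftRight_eq_div_pow]
      have hdvd : 2 ^ n = 2 ^ k * 2 ^ (n - k) := by
        rw [← pow_add]; congr 1; omega
      rw [hdvd, Nat.mul_add_div (Nat.two_pow_pos k)]
      obtain ⟨j, hj⟩ : ∃ j, n - k = j + 1 := ⟨n - k - 1, by omega⟩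
      rw [hj, pow_succ]
      omega
    rw [hshift]

theorem pv_range_two_pow_succ (n : Nat) :
    List.range (2 ^ (n + 1)) = List.range (2 ^ n) ++ (List.range (2 ^ n)).map (2 ^ n + ·) := by
  have h : 2 ^ (n + 1) = 2 ^ n + 2 ^ n := by rw [pow_succ]; omega
  rw [h, List.range_add]

theorem pv_T_full (d : String) : ∀ n a b : Nat, n ≤ a → n ≤ b →
    pvT d a b n = (List.range (2 ^ n)).map (pvPat d n) := by
  intro n
  induction n with
  | zero => intro a b _ _; rfl
  | succ n ih =>
      intro a b ha hb
      simp only [pvT, if_neg (by omega : ¬ a = 0), if_neg (by omega : ¬ b = 0)]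
      rw [ih (a - 1) b (by omega) (by omega), ih a (b - 1) (by omega) (by omega)]
      rw [pv_range_two_pow_succ, List.map_append, List.map_map, List.map_map, List.map_map]
      congr 1
      · apply List.map_congr_left
        intro m hm
        exact (pv_pat_low d n m (List.mem_range.mp hm)).symm
      · apply List.map_congr_left
        intro m hm
        exact (pv_pat_high d n m (List.mem_range.mp hm)).symm

theorem pv_T_almost (d : String) : ∀ n a : Nat, n + 1 ≤ a →
    pvT d a n (n + 1) = (List.range (2 ^ (n + 1) - 1)).map (pvPat d (n + 1)) := by
  intro n
  induction n with
  | zero =>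
      intro a ha
      rw [pvT, if_neg (by omega : ¬ a = 0), if_pos rfl]
      simp [pvPat, pvT]
  | succ n ih =>
      intro a ha
      rw [pvT, if_neg (by omega : ¬ a = 0), if_neg (by omega : ¬ n + 1 = 0)]
      simp only [Nat.add_sub_cancel]
      rw [pv_T_full d (n + 1) (a - 1) (n + 1) (by omega) (by omega), ih a (by omega)]
      have hsplit : List.range (2 ^ (n + 1 + 1) - 1) =
          List.range (2 ^ (n + 1)) ++ (List.range (2 ^ (n + 1) - 1)).map (2 ^ (n + 1) + ·) := by
        have h : 2 ^ (n + 1 + 1) - 1 = 2 ^ (n + 1) + (2 ^ (n + 1) - 1) := by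
          rw [pow_succ]; have := Nat.two_pow_pos (n + 1); omega
        rw [h, List.range_add]
      rw [hsplit, List.map_append, List.map_map, List.map_map, List.map_map]
      congr 1
      · apply List.map_congr_left
        intro m hm
        exact (pv_pat_low d (n + 1) m (List.mem_range.mp hm)).symm
      · apply List.map_congr_left
        intro m hm
        have : m < 2 ^ (n + 1) := by have := List.mem_range.mp hm; have := Nat.two_pow_pos (n+1); omega
        exact (pv_pat_high d (n + 1) m this).symm

theorem pv_T_nodup (d : String) (hd : d ≠ "S") : ∀ r a b : Nat, (pvT d a b r).Nodup := by
  intro r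
  induction r with
  | zero => intro a b; simp [pvT]
  | succ r ih =>
      intro a b
      simp only [pvT]
      apply List.Nodup.append
      · split
        · exact List.nodup_nil
        · exact (ih (a - 1) b).map (fun x y h => by injection h)
      · split
        · exact List.nodup_nil
        · exact (ih a (b - 1)).map (fun x y h => by injection h)
      · intro x hx hy
        split at hx
        · simp at hx
        · split at hy
          · simp at hy
          · obtain ⟨p, _, rfl⟩ := List.mem_map.mp hx
            obtain ⟨q, _, hq⟩ := List.mem_map.mp hy
            exact hd (List.cons_eq_cons.mp hq.symm).1

theorem pv_ofList_replicate {α : Type} [BEq α] [LawfulBEq α] (k : Nat) (hk : 0 < k) (x : α) :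
    PySem.Set.ofList (List.replicate k x) = [x] := by
  obtain ⟨k', rfl⟩ : ∃ k', k = k' + 1 := ⟨k - 1, by omega⟩
  rw [List.replicate_succ, ← List.singleton_append]
  rw [pv_ofList_absorb [x] _ (fun y hy => by simp [List.eq_of_mem_replicate hy])]
  rfl

theorem pv_perms_allS : ∀ r m : Nat, r ≤ m →
    PySem.Set.ofList (PySem.List.permutations (List.replicate m "S") r) = [List.replicate r "S"] := by
  intro r
  induction r with
  | zero => intro m _; rfl
  | succ r ih =>
      intro m hm
      have hpool : List.replicate m "S" = List.replicate 0 "S" ++ List.replicate m "S" := rfl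
      rw [hpool, pv_perms_pool_succ "S" 0 m r]
      simp only [List.range_zero, List.flatMap_nil, List.nil_append, List.replicate_zero,
        List.nil_append]
      rw [pv_ofList_flatMap_const m (by omega), pv_ofList_map_inj _ (fun x y h => by injection h),
        ih (m - 1) (by omega)]
      rfl

-- the single-value branch: A's permutation set = B's bitmask enumeration
theorem pv_main (d : String) (n : Nat) :
    PySem.Set.ofList (PySem.List.permutations (List.replicate n d ++ List.replicate (n - 1) "S") n) =
      PySem.Set.ofList ((List.range (2 ^ n - (if 0 < n then 1 else 0))).map (fun m =>
        (List.range n).map (fun i => if (m >>> (n - 1 - i)) % 2 = 1 then "S" else d))) := by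
  have hpat : (fun m => (List.range n).map (fun i => if (m >>> (n - 1 - i)) % 2 = 1 then "S" else d))
      = pvPat d n := rfl
  rw [hpat]
  by_cases hd : d = "S"
  · subst hd
    have hpatS : ∀ m, pvPat "S" n m = List.replicate n "S" := by
      intro m
      unfold pvPat
      rw [List.map_congr_left (fun i _ => ite_self _), List.map_const']
      simp
    cases n with
    | zero => rfl
    | succ k =>
        have hpool : List.replicate (k + 1) "S" ++ List.replicate (k + 1 - 1) "S"
            = List.replicate (k + 1 + k) "S" := by
          rw [List.replicate_append_replicate, Nat.add_sub_cancel]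
        rw [hpool, pv_perms_allS (k + 1) (k + 1 + k) (by omega)]
        rw [List.map_congr_left (fun m _ => hpatS m), List.map_const', List.length_range]
        rw [pv_ofList_replicate _ (by
          rw [if_pos (Nat.succ_pos k)]
          have h : 2 ^ 1 ≤ 2 ^ (k + 1) := Nat.pow_le_pow_right (by omega) (by omega)
          norm_num at h
          omega) _]
  · cases n with
    | zero => rfl
    | succ k =>
        rw [pv_ofList_perms_eq_T d hd (k + 1) (k + 1) (k + 1 - 1)]
        simp only [Nat.add_sub_cancel, if_pos (by omega : 0 < k + 1)]
        rw [pv_T_almost d k (k + 1) (by omega)]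
        rw [PySem.Set.ofList_eq_self_of_nodup]
        rw [← pv_T_almost d k (k + 1) (by omega)]
        exact pv_T_nodup d hd (k + 1) (k + 1) k

-- ===== VERDICT (by name: the statement is the Claim_ definition above) =====
set_option maxHeartbeats 4000000 in
set_option maxRecDepth 10000 in
theorem generate_constraint_domain_spec : Claim_equal_generate_constraint_domain := by
  intro domain n_adj _ hpre
  show generate_constraint_domain domain n_adj = generate_constraint_domain_alt domain n_adj
  unfold generate_constraint_domain generate_constraint_domain_alt
  by_cases h1 : domain.length = 1
  · rw [if_pos h1, if_pos h1]
    obtain ⟨d, rfl⟩ : ∃ d, domain = [d] := by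
      match domain, h1 with
      | [d], _ => exact ⟨d, rfl⟩
    have hn : 0 ≤ n_adj := hpre.1 h1
    have hpool1 : (PySem.List.pyRange 0 n_adj 1).map (fun _ => d) =
        List.replicate n_adj.toNat d := by
      rw [List.map_const', PySem.List.length_pyRange_one]
      congr 1
      omega
    have hpool2 : (PySem.List.pyRange 0 (n_adj - 1) 1).map (fun _ => ("S" : String)) =
        List.replicate (n_adj.toNat - 1) "S" := by
      rw [List.map_const', PySem.List.length_pyRange_one]
      congr 1
      omega
    simp only [PySem.List.pyGetD_zero_cons]
    rw [hpool1, hpool2]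
    exact pv_main d n_adj.toNat
  · rw [if_neg h1, if_neg h1]
    by_cases h2 : n_adj = 2
    · rw [if_pos h2, if_pos h2]
      decide
    · rw [if_neg h2, if_neg h2]
      by_cases h3 : n_adj = 3
      · rw [if_pos h3, if_pos h3]
        decide
      · rw [if_neg h3, if_neg h3]
        decide
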